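-- pv_equiv track=rewrite | github.com/Olimi-net/Example | editor.py | paste_row
-- ===== SOURCE A (Python) =====
-- def paste_row(n, buf, txt):
--     if not n in buf:
--         buf[len(buf)] = txt
--         return buf
--     d1 = {}
--     for e in buf:
--         if e == n:
--             d1[len(d1)] = txt
--         d1[len(d1)] = buf[e]
--     return d1
-- ===== SOURCE B (Python) =====
-- def paste_row(n, buf, txt):
--     if not n in buf:
--         buf[len(buf)] = txt
--         return buf
--     idx = list(buf).index(n)
--     vals = list(buf.values())
--     new_vals = vals[:idx] + [txt] + vals[idx:]
--     return {i: v for i, v in enumerate(new_vals)}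
-- ===== Notes on version B (the rewrite author's own statement) =====
-- stated objective: simpler
-- what changed: A streams over the dict rebuilding it with a running length counter and a per-key dict lookup; B finds the insertion index once, splices the values list with slicing, and re-enumerates it. Pre_ only excludes association lists with a repeated key, which represent no Python dict, so no real input is excluded.
import Mathlib
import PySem

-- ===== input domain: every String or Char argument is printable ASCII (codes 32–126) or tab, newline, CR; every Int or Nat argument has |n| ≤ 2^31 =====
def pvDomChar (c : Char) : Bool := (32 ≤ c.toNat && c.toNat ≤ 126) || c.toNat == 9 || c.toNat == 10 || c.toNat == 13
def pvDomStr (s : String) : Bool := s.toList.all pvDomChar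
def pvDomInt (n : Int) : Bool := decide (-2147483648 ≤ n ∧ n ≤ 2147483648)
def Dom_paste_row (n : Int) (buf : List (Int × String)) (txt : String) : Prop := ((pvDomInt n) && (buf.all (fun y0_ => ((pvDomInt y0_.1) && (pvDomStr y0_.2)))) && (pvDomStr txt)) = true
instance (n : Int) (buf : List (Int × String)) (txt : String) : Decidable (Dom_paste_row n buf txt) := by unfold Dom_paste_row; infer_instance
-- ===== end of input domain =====

-- B replaces A's streaming rebuild (running length counter + per-key dict lookup) by: find the
-- insertion index once, splice the values list, re-enumerate — simpler, one lookup-free pass.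
-- Both A and B mutate `buf` in place in the `n not in buf` branch; the equivalence proved here
-- is about the RETURN value (identical in both: the same updated dict).

-- ===== PORT A =====
def paste_row (n : Int) (buf : List (Int × String)) (txt : String) : List (Int × String) :=
  let bufD := PySem.Dict.mk buf
  if ¬ bufD.contains n then
    -- buf[len(buf)] = txt; return buf
    (bufD.insert (Int.ofNat bufD.size) txt).items
  else
    -- d1 = {}; for e in buf: …  (iterates keys in insertion order; buf[e] is a dict lookup)
    (buf.foldl (fun d1 e =>
        let d1 := if e.1 == n then d1.insert (Int.ofNat d1.size) txt else d1
        d1.insert (Int.ofNat d1.size) (bufD.getD e.1 "")) PySem.Dict.empty).items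

-- ===== PORT B =====
def paste_row_alt (n : Int) (buf : List (Int × String)) (txt : String) : List (Int × String) :=
  let bufD := PySem.Dict.mk buf
  if ¬ bufD.contains n then
    (bufD.insert (Int.ofNat bufD.size) txt).items
  else
    match PySem.List.index? bufD.keys n with
    | none => []      -- unreachable: this branch has n ∈ keys
    | some idx =>
      let vals := bufD.values
      let newVals := PySem.List.slice vals none (some (idx : Int)) ++ [txt]
                       ++ PySem.List.slice vals (some (idx : Int)) none
      PySem.List.enumerate newVals 0    -- {i: v for i, v in enumerate(new_vals)}

-- ===== PRECONDITION & SPEC =====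
-- Pre_ excludes only association lists with a repeated key: those represent no Python dict
-- (dict keys are unique), so A never receives them; no input A returns on is excluded.
def Pre_paste_row (n : Int) (buf : List (Int × String)) (txt : String) : Prop :=
  (buf.map Prod.fst).Nodup
instance (n : Int) (buf : List (Int × String)) (txt : String) : Decidable (Pre_paste_row n buf txt) := by unfold Pre_paste_row; infer_instance
def pvWitness_paste_row : Int × (List (Int × String)) × String := (1, [(0, "a"), (1, "b"), (2, "c")], "X")

def Spec_paste_row (n : Int) (buf : List (Int × String)) (txt : String) (out : List (Int × String)) : Prop := out = paste_row_alt n buf txt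
instance (n : Int) (buf : List (Int × String)) (txt : String) (out : List (Int × String)) : Decidable (Spec_paste_row n buf txt out) := by unfold Spec_paste_row; infer_instance

-- ===== CLAIM (what is proved, stated in full; the proofs are below) =====
def Claim_equal_paste_row : Prop := ∀ (n : Int) (buf : List (Int × String)) (txt : String), Dom_paste_row n buf txt → Pre_paste_row n buf txt → Spec_paste_row n buf txt (paste_row n buf txt)

-- ===== LEMMAS AND PROOFS =====

def pvOut (n : Int) (txt : String) (l : List (Int × String)) : List String :=
  l.flatMap (fun e => if e.1 = n then [txt, e.2] else [e.2])

def pvStepA (n : Int) (txt : String) (d1 : PySem.Dict Int String) (e : Int × String) : PySem.Dict Int String :=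
  let d1 := if e.1 == n then d1.insert (Int.ofNat d1.size) txt else d1
  d1.insert (Int.ofNat d1.size) e.2

lemma insert_enumerate_size (ws : List String) (v : String) :
    (PySem.Dict.mk (PySem.List.enumerate ws 0)).insert (Int.ofNat (PySem.Dict.mk (PySem.List.enumerate ws 0)).size) v
      = PySem.Dict.mk (PySem.List.enumerate (ws ++ [v]) 0) := by
  have hc : (PySem.Dict.mk (PySem.List.enumerate ws 0)).contains (Int.ofNat (PySem.Dict.mk (PySem.List.enumerate ws 0)).size) = false := by
    rw [PySem.Dict.contains_eq_decide_mem_keys]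
    simp only [PySem.Dict.keys_mk, PySem.List.map_fst_enumerate, PySem.Dict.size]
    simp [PySem.List.mem_pyRange_one, PySem.List.length_enumerate]
  apply PySem.Dict.ext
  rw [PySem.Dict.items_insert, hc]
  simp [PySem.List.enumerate_append, PySem.Dict.size, PySem.List.length_enumerate,
    PySem.List.enumerate_cons, PySem.List.enumerate_nil]

lemma pvStepA_enum (n : Int) (txt : String) (ws : List String) (e : Int × String) :
    pvStepA n txt (PySem.Dict.mk (PySem.List.enumerate ws 0)) e
      = PySem.Dict.mk (PySem.List.enumerate (ws ++ (if e.1 = n then [txt, e.2] else [e.2])) 0) := by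
  by_cases h : e.1 = n
  · simp only [pvStepA, h, beq_self_eq_true, if_pos]
    rw [insert_enumerate_size, insert_enumerate_size]
    simp [List.append_assoc]
  · simp only [pvStepA, beq_iff_eq, h, if_false]
    rw [insert_enumerate_size]

lemma foldl_loop (n : Int) (txt : String) (l : List (Int × String)) (ws : List String) :
    l.foldl (pvStepA n txt) (PySem.Dict.mk (PySem.List.enumerate ws 0))
      = PySem.Dict.mk (PySem.List.enumerate (ws ++ pvOut n txt l) 0) := by
  induction l generalizing ws with
  | nil => simp [pvOut]
  | cons e l ih =>
    rw [List.foldl_cons, pvStepA_enum, ih]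
    simp [pvOut, List.append_assoc]

lemma pvOut_of_not_mem (n : Int) (txt : String) (l : List (Int × String))
    (h : n ∉ l.map Prod.fst) : pvOut n txt l = l.map Prod.snd := by
  induction l with
  | nil => rfl
  | cons e l ih =>
    simp only [List.map_cons, List.mem_cons, not_or] at h
    have hne : ¬ e.1 = n := fun hh => h.1 hh.symm
    have h2 := ih h.2
    simp only [pvOut, List.flatMap_cons, if_neg hne, List.singleton_append, List.map_cons] at h2 ⊢
    rw [h2]

lemma pvOut_eq_splice (n : Int) (txt : String) (l : List (Int × String)) (idx : Nat)
    (hnd : (l.map Prod.fst).Nodup) (hidx : PySem.List.index? (l.map Prod.fst) n = some idx) :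
    pvOut n txt l = (l.map Prod.snd).take idx ++ [txt] ++ (l.map Prod.snd).drop idx := by
  induction l generalizing idx with
  | nil => simp [PySem.List.index?] at hidx
  | cons e l ih =>
    simp only [List.map_cons] at hidx hnd
    by_cases h : e.1 = n
    · rw [h, PySem.List.index?_cons_self] at hidx
      injection hidx with hh; subst hh
      rw [h] at hnd
      simp only [List.nodup_cons] at hnd
      have h2 := pvOut_of_not_mem n txt l hnd.1
      simp only [pvOut] at h2
      simp [pvOut, h, h2]
    · rw [PySem.List.index?_cons_of_ne _ h] at hidx
      cases hk : PySem.List.index? (l.map Prod.fst) n with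
      | none => rw [hk] at hidx; simp at hidx
      | some k =>
        rw [hk] at hidx; simp only [Option.map_some] at hidx
        injection hidx with hh; subst hh
        simp only [List.nodup_cons] at hnd
        have h2 := ih k hnd.2 hk
        simp only [pvOut] at h2
        simp [pvOut, h, h2]

-- ===== VERDICT (by name: the statement is the Claim_ definition above) =====
theorem paste_row_spec : Claim_equal_paste_row := by
  intro n buf txt _ hpre
  unfold Spec_paste_row paste_row paste_row_alt
  simp only []
  by_cases hcon : (PySem.Dict.mk buf).contains n
  · simp only [hcon, not_true, if_false]
    have hmem : n ∈ buf.map Prod.fst := by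
      rw [PySem.Dict.contains_eq_decide_mem_keys] at hcon
      simpa [PySem.Dict.keys_mk] using of_decide_eq_true hcon
    have hsome : (PySem.List.index? ((PySem.Dict.mk buf).keys) n).isSome := by
      rw [PySem.List.index?_isSome_iff]
      simpa [PySem.Dict.keys_mk] using hmem
    cases hidx : PySem.List.index? ((PySem.Dict.mk buf).keys) n with
    | none => rw [hidx] at hsome; simp at hsome
    | some idx =>
      have hstep : buf.foldl (fun d1 e =>
          let d1 := if e.1 == n then d1.insert (Int.ofNat d1.size) txt else d1
          d1.insert (Int.ofNat d1.size) ((PySem.Dict.mk buf).getD e.1 "")) PySem.Dict.empty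
          = buf.foldl (pvStepA n txt) PySem.Dict.empty := by
        apply PySem.List.foldl_congr_mem
        intro acc x hx
        have hget : (PySem.Dict.mk buf).getD x.1 "" = x.2 := by
          apply PySem.Dict.getD_of_mem_items
          · simpa using hx
          · simpa [PySem.Dict.keys_mk] using hpre
        simp [pvStepA, hget]
      rw [hstep]
      have hloop : List.foldl (pvStepA n txt) PySem.Dict.empty buf
          = PySem.Dict.mk (PySem.List.enumerate (pvOut n txt buf) 0) := foldl_loop n txt buf []
      rw [hloop]
      have hidx' : PySem.List.index? (buf.map Prod.fst) n = some idx := by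
        simpa [PySem.Dict.keys_mk] using hidx
      have hsp := pvOut_eq_splice n txt buf idx (by simpa [PySem.Dict.keys_mk] using hpre) hidx'
      rw [hsp]
      simp [PySem.Dict.values_mk, PySem.List.slice_to_natCast, PySem.List.slice_from_natCast]
  · simp [hcon]
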